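-- pv_equiv track=rewrite | github.com/axmedovarayyona49-debug/programming | week14assigment.py | check_books
-- ===== SOURCE A (Python) =====
-- def check_books(catalog, returned):
--     not_returned = set()
--     extra_books = set()
--
--     for isbn in catalog:
--         if isbn not in returned:
--             not_returned.add(isbn)
--
--     for isbn in returned:
--         if isbn not in catalog:
--             extra_books.add(isbn)
--
--     return not_returned, extra_books
-- ===== SOURCE B (Python) =====
-- def check_books(catalog, returned):
--     # one-pass flag table: isbn -> (in_catalog, in_returned), then a single
--     # classification pass over the table (O(n+m) instead of A's nested scans)
--     flags = {}
--     for isbn in catalog: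
--         flags[isbn] = (True, False)
--     for isbn in returned:
--         flags[isbn] = (flags.get(isbn, (False, False))[0], True)
--     not_returned = set()
--     extra_books = set()
--     for isbn, (in_cat, in_ret) in flags.items():
--         if in_cat and not in_ret:
--             not_returned.add(isbn)
--         elif in_ret and not in_cat:
--             extra_books.add(isbn)
--     return not_returned, extra_books
-- ===== Notes on version B (the rewrite author's own statement) =====
-- stated objective: faster
-- what changed: Replaces A's two quadratic passes (each doing a linear 'in' scan over the other list) by building one dict mapping isbn -> (in_catalog, in_returned) flags in two linear passes and then classifying the dict items in a single pass.
import Mathlib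
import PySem

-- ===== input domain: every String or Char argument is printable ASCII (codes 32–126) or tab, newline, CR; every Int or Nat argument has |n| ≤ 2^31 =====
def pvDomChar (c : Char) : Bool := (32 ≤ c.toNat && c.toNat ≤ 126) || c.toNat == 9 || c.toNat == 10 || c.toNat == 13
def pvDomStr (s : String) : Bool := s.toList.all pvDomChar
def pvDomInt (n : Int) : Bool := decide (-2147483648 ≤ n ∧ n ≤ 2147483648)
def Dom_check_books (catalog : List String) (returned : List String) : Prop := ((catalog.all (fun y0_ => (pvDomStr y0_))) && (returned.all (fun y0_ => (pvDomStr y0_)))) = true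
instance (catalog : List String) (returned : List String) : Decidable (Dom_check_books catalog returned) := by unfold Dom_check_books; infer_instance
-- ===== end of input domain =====

-- B builds one isbn -> (in_catalog, in_returned) flag table and classifies it in a single pass: O(n+m) instead of A's nested membership scans.

-- ===== PORT A =====
def check_books (catalog : List String) (returned : List String) : List String × List String :=
  let not_returned := catalog.foldl
    (fun s isbn => if returned.contains isbn then s else PySem.Set.add s isbn)
    ([] : PySem.Set String)
  let extra_books := returned.foldl
    (fun s isbn => if catalog.contains isbn then s else PySem.Set.add s isbn)
    ([] : PySem.Set String)
  (not_returned, extra_books)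

-- ===== PORT B =====
def check_books_alt (catalog : List String) (returned : List String) : List String × List String :=
  let d1 : PySem.Dict String (Bool × Bool) :=
    catalog.foldl (fun d isbn => d.insert isbn (true, false)) PySem.Dict.empty
  let d2 := returned.foldl
    (fun d isbn => d.insert isbn ((d.getD isbn (false, false)).1, true)) d1
  d2.items.foldl
    (fun acc p =>
      if p.2.1 && !p.2.2 then (PySem.Set.add acc.1 p.1, acc.2)
      else if p.2.2 && !p.2.1 then (acc.1, PySem.Set.add acc.2 p.1)
      else acc)
    (([] : PySem.Set String), ([] : PySem.Set String))

-- ===== PRECONDITION & SPEC =====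
def Spec_check_books (catalog : List String) (returned : List String) (out : List String × List String) : Prop := out = check_books_alt catalog returned
instance (catalog : List String) (returned : List String) (out : List String × List String) : Decidable (Spec_check_books catalog returned out) := by unfold Spec_check_books; infer_instance

-- ===== CLAIM (what is proved, stated in full; the proofs are below) =====
def Claim_equal_check_books : Prop := ∀ (catalog : List String) (returned : List String), Dom_check_books catalog returned → Spec_check_books catalog returned (check_books catalog returned)

-- ===== LEMMAS AND PROOFS =====

-- the first dict pass records (in_catalog, false)
lemma getD_pass1 (l : List String) (d : PySem.Dict String (Bool × Bool)) (k : String) :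
    ((l.foldl (fun d i => d.insert i (true, false)) d).getD k (false, false))
      = if l.contains k then (true, false) else d.getD k (false, false) := by
  induction l generalizing d with
  | nil => simp
  | cons i t ih =>
    simp only [List.foldl_cons, ih, List.contains_cons]
    by_cases hik : k = i
    · subst hik
      simp [PySem.Dict.getD_insert_self]
    · simp [PySem.Dict.getD_insert_of_ne _ _ _ hik,
        show (k == i) = false by simpa using hik]

-- the second dict pass sets the snd flag and preserves the fst flag
lemma getD_pass2 (c : String → Bool) (l : List String) (d : PySem.Dict String (Bool × Bool))
    (hd : ∀ j, (d.getD j (false, false)).1 = c j) (k : String) :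
    ((l.foldl (fun d i => d.insert i ((d.getD i (false, false)).1, true)) d).getD k (false, false))
      = if l.contains k then (c k, true) else d.getD k (false, false) := by
  induction l generalizing d with
  | nil => simp
  | cons i t ih =>
    simp only [List.foldl_cons, List.contains_cons]
    rw [ih]
    · by_cases hik : k = i
      · subst hik
        simp [PySem.Dict.getD_insert_self, hd]
      · simp [PySem.Dict.getD_insert_of_ne _ _ _ hik,
          show (k == i) = false by simpa using hik]
    · intro j
      by_cases hji : j = i
      · subst hji; simp [PySem.Dict.getD_insert_self, hd]
      · simp [PySem.Dict.getD_insert_of_ne _ _ _ hji, hd]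

-- a pair-building fold splits into two independent folds
lemma foldl_pair_split (c r : String → Bool) (ks : List String) (u v : List String) :
    ks.foldl (fun acc k =>
        if c k && !r k then (PySem.Set.add acc.1 k, acc.2)
        else if r k && !c k then (acc.1, PySem.Set.add acc.2 k) else acc) (u, v)
    = (ks.foldl (fun t k => if c k && !r k then PySem.Set.add t k else t) u,
       ks.foldl (fun t k => if r k && !c k then PySem.Set.add t k else t) v) := by
  induction ks generalizing u v with
  | nil => rfl
  | cons k t ih =>
    cases hc : c k <;> cases hr : r k <;>
      simp only [List.foldl_cons, hc, hr, Bool.not_true, Bool.not_false, Bool.and_true,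
        Bool.and_false, Bool.false_eq_true, if_true, if_false, ih]

-- a conditional Set.add fold over distinct fresh elements is a filter
lemma foldl_condAdd_eq_filter (p : String → Bool) :
    ∀ (ks : List String) (u : List String), ks.Nodup → (∀ k ∈ ks, k ∉ u) →
      ks.foldl (fun t k => if p k then PySem.Set.add t k else t) u = u ++ ks.filter p
  | [], u, _, _ => by simp
  | k :: t, u, hnd, hu => by
    simp only [List.foldl_cons, List.filter_cons]
    have hk : k ∉ u := hu k (by simp)
    by_cases hp : p k
    · have hadd : PySem.Set.add u k = u ++ [k] := by
        simp [PySem.Set.add, PySem.Set.contains, hk]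
      rw [hp, if_pos rfl, hadd,
        foldl_condAdd_eq_filter p t (u ++ [k]) hnd.of_cons ?fresh]
      · simp
      case fresh =>
        intro j hj
        have hjk : j ≠ k := fun h => (List.nodup_cons.mp hnd).1 (h ▸ hj)
        simp [hu j (by simp [hj]), hjk]
    · rw [if_neg (by simp [hp]),
        foldl_condAdd_eq_filter p t u hnd.of_cons (fun j hj => hu j (by simp [hj]))]
      simp [hp]

-- filtering a Set-building fold by ¬q pushes the filter into a conditional add
lemma filter_foldl_add (q : String → Bool) (l : List String) (s : List String) :
    (l.foldl PySem.Set.add s).filter (fun k => !q k)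
      = l.foldl (fun t i => if q i then t else PySem.Set.add t i)
          (s.filter (fun k => !q k)) := by
  induction l generalizing s with
  | nil => rfl
  | cons i t ih =>
    simp only [List.foldl_cons]
    rw [ih]
    congr 1
    by_cases hq : q i
    · rw [if_pos hq]
      by_cases hi : i ∈ s <;>
        simp [PySem.Set.add, PySem.Set.contains, hi, hq]
    · rw [if_neg hq]
      by_cases hi : i ∈ s <;>
        simp [PySem.Set.add, PySem.Set.contains, hi, hq, List.mem_filter]

-- a conditional-add fold does nothing when the guard always fires
lemma foldl_inert (q : String → Bool) (l : List String) (h : ∀ i ∈ l, q i = true)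
    (acc : List String) :
    l.foldl (fun t i => if q i then t else PySem.Set.add t i) acc = acc := by
  induction l generalizing acc with
  | nil => rfl
  | cons i t ih =>
    simp only [List.foldl_cons, h i (by simp)]
    exact ih (fun j hj => h j (by simp [hj])) acc

-- ===== VERDICT (by name: the statement is the Claim_ definition above) =====
theorem check_books_spec : Claim_equal_check_books := by
  intro catalog returned _
  unfold Spec_check_books
  simp only [check_books, check_books_alt]
  set d1 : PySem.Dict String (Bool × Bool) :=
    catalog.foldl (fun d isbn => d.insert isbn (true, false)) PySem.Dict.empty with hd1
  set d2 : PySem.Dict String (Bool × Bool) :=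
    returned.foldl (fun d isbn => d.insert isbn ((d.getD isbn (false, false)).1, true)) d1 with hd2
  have hkeys1 : d1.keys = catalog.foldl PySem.Set.add [] := by
    rw [hd1, PySem.Dict.keys_foldl_insert]
    simp [PySem.Set.update, PySem.Dict.empty, PySem.Dict.keys, ← PySem.Set.ofList_eq_foldl]
  have hkeys : d2.keys = (catalog ++ returned).foldl PySem.Set.add [] := by
    rw [hd2, PySem.Dict.keys_foldl_insert, hkeys1, PySem.Set.update, List.foldl_append]
  have hnd1 : d1.keys.Nodup := by
    rw [hd1]
    exact PySem.Dict.nodup_keys_foldl_insert _ _ _ (by simp [PySem.Dict.empty, PySem.Dict.keys])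
  have hnd : d2.keys.Nodup := by
    rw [hd2]; exact PySem.Dict.nodup_keys_foldl_insert _ _ _ hnd1
  have hflags : ∀ k, d2.getD k (false, false) = (catalog.contains k, returned.contains k) := by
    intro k
    have h1 : ∀ j, (d1.getD j (false, false)).1 = catalog.contains j := by
      intro j
      rw [hd1, getD_pass1]
      by_cases hj : catalog.contains j <;>
        simp_all [PySem.Dict.empty, PySem.Dict.getD, PySem.Dict.get?]
    rw [hd2, getD_pass2 (fun j => catalog.contains j) _ _ h1]
    by_cases hr : returned.contains k
    · simp_all
    · rw [if_neg (by simpa [List.contains_iff_mem] using hr), hd1, getD_pass1]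
      by_cases hc : catalog.contains k <;>
        simp_all [PySem.Dict.empty, PySem.Dict.getD, PySem.Dict.get?]
  have hitems : d2.items = d2.keys.map (fun k => (k, (catalog.contains k, returned.contains k))) := by
    rw [PySem.Dict.items_eq_map_keys d2 hnd (false, false)]
    exact List.map_congr_left (fun k _ => by rw [hflags k])
  rw [hitems, List.foldl_map,
    foldl_pair_split (fun k => catalog.contains k) (fun k => returned.contains k)]
  have hmem : ∀ k ∈ d2.keys, k ∈ catalog ++ returned := by
    intro k hk
    rw [hkeys] at hk
    have : k ∈ PySem.Set.ofList (catalog ++ returned) := by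
      rw [PySem.Set.ofList_eq_foldl]; exact hk
    simpa using (PySem.Set.mem_ofList _ _).mp this
  have e1 : d2.keys.foldl
      (fun t k => if catalog.contains k && !returned.contains k then PySem.Set.add t k else t) []
      = catalog.foldl (fun s isbn => if returned.contains isbn then s else PySem.Set.add s isbn) [] := by
    rw [foldl_condAdd_eq_filter _ _ [] hnd (by simp), List.nil_append,
      List.filter_congr (l := d2.keys)
        (q := fun k => !returned.contains k) ?_]
    · rw [hkeys, filter_foldl_add, List.filter_nil, List.foldl_append]
      exact foldl_inert _ _ (fun i hi => by simp [hi]) _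
    · intro k hk
      by_cases hr : k ∈ returned
      · simp [hr]
      · have hkc : k ∈ catalog := (List.mem_append.mp (hmem k hk)).resolve_right hr
        simp [hr, hkc]
  have e2 : d2.keys.foldl
      (fun t k => if returned.contains k && !catalog.contains k then PySem.Set.add t k else t) []
      = returned.foldl (fun s isbn => if catalog.contains isbn then s else PySem.Set.add s isbn) [] := by
    rw [foldl_condAdd_eq_filter _ _ [] hnd (by simp), List.nil_append,
      List.filter_congr (l := d2.keys)
        (q := fun k => !catalog.contains k) ?_]
    · rw [hkeys, filter_foldl_add, List.filter_nil, List.foldl_append,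
        foldl_inert _ _ (fun i hi => by simp [hi]) ([] : List String)]
    · intro k hk
      by_cases hc : k ∈ catalog
      · simp [hc]
      · have hkr : k ∈ returned := (List.mem_append.mp (hmem k hk)).resolve_left hc
        simp [hc, hkr]
  rw [e1, e2]
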